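-- pv_equiv track=rewrite | github.com/Nikolay-Lysenko/readingbricks | readingbricks/resources.py | __insert_blank_line_before_each_list
-- ===== SOURCE A (Python) =====
-- def __insert_blank_line_before_each_list(contents: list[str]) -> list[str]:
--     """Insert blank line before each Markdown list when it is needed by Misaka parser."""
--     list_markers = ['* ', '- ', '+ ', '1. ']
--     result = []
--     for first, second in zip(contents, contents[1:]):
--         result.append(first)
--         if any([second.startswith(x) for x in list_markers]) and first:
--             result.append('')
--     result.append(contents[-1])
--     return result
-- ===== SOURCE B (Python) =====
-- def __insert_blank_line_before_each_list(contents: list[str]) -> list[str]: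
--     """Insert blank line before each Markdown list when it is needed by Misaka parser."""
--     markers = ('* ', '- ', '+ ', '1. ')
--     cut_points = [i for i in range(1, len(contents))
--                   if contents[i].startswith(markers) and contents[i - 1]]
--     result = []
--     start = 0
--     for i in cut_points:
--         result += contents[start:i] + ['']
--         start = i
--     result += contents[start:]
--     return result
-- ===== Notes on version B (the rewrite author's own statement) =====
-- stated objective: faster
-- what changed: Two staged passes instead of A's single zip-with-tail pass: first compute the list of cut indices where a blank is needed, then rebuild the output by concatenating the slices between consecutive cut points joined with ''; bulk slice copies replace per-line appends and the per-line marker-list comprehension (tuple startswith on the first pass only).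
import Mathlib
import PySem

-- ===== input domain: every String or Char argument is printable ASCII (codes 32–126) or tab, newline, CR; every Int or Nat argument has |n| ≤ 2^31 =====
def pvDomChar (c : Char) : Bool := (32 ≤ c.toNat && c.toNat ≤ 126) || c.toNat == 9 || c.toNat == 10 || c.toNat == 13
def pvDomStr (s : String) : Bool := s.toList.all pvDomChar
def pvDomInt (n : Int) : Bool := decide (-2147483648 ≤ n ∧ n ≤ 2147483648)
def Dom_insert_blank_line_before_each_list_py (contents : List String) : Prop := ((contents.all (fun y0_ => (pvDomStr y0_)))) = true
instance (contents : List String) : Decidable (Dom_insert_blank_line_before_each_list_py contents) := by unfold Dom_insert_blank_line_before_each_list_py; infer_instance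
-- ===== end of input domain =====

-- B replaces A's single zip-with-tail pass (blank appended AFTER each predecessor, last element
-- appended separately) by two staged passes: collect the cut indices, then rebuild the output from
-- the slices between consecutive cut points joined with ''. Return values only; no mutation either side.

-- ===== PORT A =====
def insert_blank_line_before_each_list_py (contents : List String) : List String :=
  let list_markers := ["* ", "- ", "+ ", "1. "]
  let result := (contents.zip (PySem.List.slice contents (some 1) none)).foldl
    (fun acc p =>
      let acc := acc ++ [p.1]
      if ((list_markers.map (fun x => PySem.Str.startswith p.2 x)).any id) && (p.1 != "") then
        acc ++ [""]
      else acc) []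
  match PySem.List.pyGet? contents (-1) with
  | some last => result ++ [last]
  | none => result   -- IndexError in Python: excluded by Pre_

-- ===== PORT B =====
-- the comprehension's condition: contents[i].startswith(markers) and contents[i-1]
def pvIsCut (contents : List String) (i : Int) : Bool :=
  match PySem.List.pyGet? contents i, PySem.List.pyGet? contents (i - 1) with
  | some li, some lp =>
      (["* ", "- ", "+ ", "1. "].any (fun m => PySem.Str.startswith li m)) && (lp != "")
  | _, _ => false

def insert_blank_line_before_each_list_py_alt (contents : List String) : List String :=
  let cut_points := (PySem.List.pyRange 1 (contents.length : Int) 1).filter (pvIsCut contents)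
  let st := cut_points.foldl
    (fun (st : List String × Int) i =>
      (st.1 ++ PySem.List.slice contents (some st.2) (some i) ++ [""], i))
    ([], 0)
  st.1 ++ PySem.List.slice contents (some st.2) none

-- ===== PRECONDITION & SPEC =====
-- A evaluates contents[-1]; it raises IndexError exactly on the empty list.
def Pre_insert_blank_line_before_each_list_py (contents : List String) : Prop := contents ≠ []
instance (contents : List String) : Decidable (Pre_insert_blank_line_before_each_list_py contents) := by unfold Pre_insert_blank_line_before_each_list_py; infer_instance
def pvWitness_insert_blank_line_before_each_list_py : List String := ["intro", "* item"]

def Spec_insert_blank_line_before_each_list_py (contents : List String) (out : List String) : Prop := out = insert_blank_line_before_each_list_py_alt contents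
instance (contents : List String) (out : List String) : Decidable (Spec_insert_blank_line_before_each_list_py contents out) := by unfold Spec_insert_blank_line_before_each_list_py; infer_instance

-- ===== CLAIM (what is proved, stated in full; the proofs are below) =====
def Claim_equal_insert_blank_line_before_each_list_py : Prop := ∀ (contents : List String), Dom_insert_blank_line_before_each_list_py contents → Pre_insert_blank_line_before_each_list_py contents → Spec_insert_blank_line_before_each_list_py contents (insert_blank_line_before_each_list_py contents)

-- ===== LEMMAS AND PROOFS =====

-- "should a blank precede `line` after `prev`", in both programs' conjunction order
def pvCond (prev line : String) : Bool :=
  (["* ", "- ", "+ ", "1. "].any (fun m => PySem.Str.startswith line m)) && (prev != "")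

-- the common shape of both outputs after the head line
def pvGo : String → List String → List String
  | _, [] => []
  | prev, line :: t => (if pvCond prev line then ["", line] else [line]) ++ pvGo line t

-- ---- A side ----
lemma pvAFold (t : List String) : ∀ (a : String) (acc : List String),
    (((a :: t).zip t).foldl
      (fun acc p =>
        let acc := acc ++ [p.1]
        if ((["* ", "- ", "+ ", "1. "].map (fun x => PySem.Str.startswith p.2 x)).any id) && (p.1 != "") then
          acc ++ [""]
        else acc) acc) ++ [t.getLastD a] = acc ++ a :: pvGo a t := by
  induction t with
  | nil => intro a acc; simp [pvGo]
  | cons b t ih =>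
      intro a acc
      simp only [List.zip_cons_cons, List.foldl_cons, List.getLastD_cons, pvGo]
      rw [ih]
      have hc : (((["* ", "- ", "+ ", "1. "].map (fun x => PySem.Str.startswith b x)).any id) && (a != ""))
          = pvCond a b := by
        simp [pvCond]
      rw [hc]
      by_cases h : pvCond a b = true <;> simp [h]

lemma pvATop (a : String) (t : List String) :
    insert_blank_line_before_each_list_py (a :: t) = a :: pvGo a t := by
  unfold insert_blank_line_before_each_list_py
  have hA := pvAFold t a []
  simp only [List.nil_append, List.getLastD_eq_getLast?] at hA
  simp only [PySem.List.slice_from_one, List.tail_cons, PySem.List.pyGet?_neg_one,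
    List.getLast?_cons]
  exact hA

-- ---- B side ----
-- the output rebuilt from slices between successive cut points, joined with ''
def pvEmit (xs : List String) : Int → List Int → List String
  | s, [] => PySem.List.slice xs (some s) none
  | s, m :: ms => PySem.List.slice xs (some s) (some m) ++ [""] ++ pvEmit xs m ms

lemma pvFoldEmit (xs : List String) (ms : List Int) : ∀ (res : List String) (s : Int),
    (ms.foldl (fun (st : List String × Int) i =>
        (st.1 ++ PySem.List.slice xs (some st.2) (some i) ++ [""], i)) (res, s)).1
      ++ PySem.List.slice xs
          (some (ms.foldl (fun (st : List String × Int) i =>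
            (st.1 ++ PySem.List.slice xs (some st.2) (some i) ++ [""], i)) (res, s)).2) none
    = res ++ pvEmit xs s ms := by
  induction ms with
  | nil => intro res s; simp [pvEmit]
  | cons m ms ih =>
      intro res s
      simp only [List.foldl_cons, pvEmit]
      rw [ih]
      simp

lemma pvEmit_shift (xs : List String) (k : Nat) (hk : k < xs.length) (ms : List Int)
    (hms : ∀ m ∈ ms, (k : Int) < m) :
    pvEmit xs (k : Int) ms = xs[k] :: pvEmit xs ((k : Int) + 1) ms := by
  cases ms with
  | nil =>
      simp only [pvEmit]
      rw [show ((k : Int) + 1) = ((k + 1 : Nat) : Int) by push_cast; ring]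
      rw [PySem.List.slice_from_natCast, PySem.List.slice_from_natCast]
      rw [List.drop_eq_getElem_cons hk]
  | cons m ms =>
      have hm : (k : Int) < m := hms m (by simp)
      obtain ⟨j, rfl⟩ : ∃ j : Nat, m = (j : Int) := ⟨m.toNat, by omega⟩
      have hj : k < j := by exact_mod_cast hm
      simp only [pvEmit]
      rw [show ((k : Int) + 1) = ((k + 1 : Nat) : Int) by push_cast; ring]
      have h1 : PySem.List.slice xs (some (k : Int)) (some (j : Int))
          = xs[k] :: PySem.List.slice xs (some ((k + 1 : Nat) : Int)) (some (j : Int)) := by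
        have h2 : j - k = (j - (k + 1)) + 1 := by omega
        have h3 : List.drop k xs = xs[k] :: List.drop (k + 1) xs := List.drop_eq_getElem_cons hk
        rw [PySem.List.slice_natCast, PySem.List.slice_natCast, h2, h3, List.take_succ_cons]
      rw [h1]
      simp

lemma pvIsCut_succ (xs : List String) (k : Nat) (hk : k + 1 < xs.length) :
    pvIsCut xs ((k : Int) + 1) = pvCond (xs[k]'(by omega)) (xs[k + 1]'hk) := by
  unfold pvIsCut pvCond
  rw [show ((k : Int) + 1) = ((k + 1 : Nat) : Int) by push_cast; ring]
  rw [show ((k + 1 : Nat) : Int) - 1 = ((k : Nat) : Int) by push_cast; ring]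
  rw [PySem.List.pyGet?_natCast, PySem.List.pyGet?_natCast]
  rw [List.getElem?_eq_getElem hk, List.getElem?_eq_getElem (by omega)]

lemma pvL (xs : List String) : ∀ (d k : Nat), xs.length - k = d → (hk : k < xs.length) →
    pvEmit xs (k : Int) (((PySem.List.pyRange ((k : Int) + 1) (xs.length : Int) 1)).filter (pvIsCut xs))
      = xs[k] :: pvGo xs[k] (xs.drop (k + 1)) := by
  intro d
  induction d with
  | zero => intro k hd hk; omega
  | succ d ih =>
      intro k hd hk
      by_cases h : k + 1 < xs.length
      · rw [PySem.List.pyRange_one_cons (by omega)]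
        rw [show ((k : Int) + 1 + 1) = (((k + 1 : Nat) : Int) + 1) by push_cast; ring]
        have hdrop : xs.drop (k + 1) = xs[k + 1] :: xs.drop (k + 2) := List.drop_eq_getElem_cons h
        have hrec := ih (k + 1) (by omega) h
        rw [List.filter_cons]
        rw [pvIsCut_succ xs k h]
        by_cases hc : pvCond xs[k] xs[k + 1] = true
        · rw [if_pos (by simp [hc])]
          simp only [pvEmit]
          rw [show ((k : Int) + 1) = ((k + 1 : Nat) : Int) by push_cast; ring, hrec]
          have hsl : PySem.List.slice xs (some (k : Int)) (some ((k + 1 : Nat) : Int))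
              = [xs[k]] := by
            rw [show ((k : Int)) = ((k : Nat) : Int) by rfl, PySem.List.slice_natCast]
            simpa using List.take_one_drop_eq_of_lt_length hk
          rw [hsl, hdrop]
          simp [pvGo, hc]
        · rw [if_neg (by simp [hc])]
          have hshift : ∀ m ∈ ((PySem.List.pyRange (((k + 1 : Nat) : Int) + 1) (xs.length : Int) 1)).filter (pvIsCut xs),
              (k : Int) < m := by
            intro m hm
            have := PySem.List.mem_pyRange_one.mp (List.mem_of_mem_filter hm)
            push_cast at this ⊢
            omega
          rw [pvEmit_shift xs k hk _ hshift]
          rw [show ((k : Int) + 1) = ((k + 1 : Nat) : Int) by push_cast; ring]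
          rw [hrec, hdrop]
          simp [pvGo, hc]
      · -- k is the last index: the range is empty
        have hk1 : k + 1 = xs.length := by omega
        have hemp : PySem.List.pyRange ((k : Int) + 1) (xs.length : Int) 1 = [] := by
          apply List.eq_nil_iff_forall_not_mem.mpr
          intro m hm
          have := PySem.List.mem_pyRange_one.mp hm
          omega
        rw [hemp]
        simp only [List.filter_nil, pvEmit]
        rw [show ((k : Int)) = ((k : Nat) : Int) by rfl, PySem.List.slice_from_natCast]
        rw [List.drop_eq_getElem_cons hk, hk1]
        simp [pvGo]

lemma pvAltTop (a : String) (t : List String) :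
    insert_blank_line_before_each_list_py_alt (a :: t) = a :: pvGo a t := by
  unfold insert_blank_line_before_each_list_py_alt
  simp only
  rw [pvFoldEmit]
  have h := pvL (a :: t) (a :: t).length 0 (by omega) (by simp)
  norm_num at h
  simpa using h

-- ===== VERDICT (by name: the statement is the Claim_ definition above) =====
theorem insert_blank_line_before_each_list_py_spec : Claim_equal_insert_blank_line_before_each_list_py := by
  intro contents _ hpre
  unfold Spec_insert_blank_line_before_each_list_py
  match contents, hpre with
  | a :: t, _ => rw [pvATop, pvAltTop]
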